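-- pv_equiv track=rewrite | github.com/bjkomer/advent-of-code | 2023/day1.py | get_spelled_number
-- ===== SOURCE A (Python) =====
-- number_map = {
--     "zero": "0",
--     "one": "1",
--     "two": "2",
--     "three": "3",
--     "four": "4",
--     "five": "5",
--     "six": "6",
--     "seven": "7",
--     "eight": "8",
--     "nine": "9",
--     "0": "0",
--     "1": "1",
--     "2": "2",
--     "3": "3",
--     "4": "4",
--     "5": "5",
--     "6": "6",
--     "7": "7",
--     "8": "8",
--     "9": "9",
-- }
--
-- def get_spelled_number(line):
--     num_str = ''
--     for i, line_check in enumerate([line, line[::-1]]):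
--         best_ind = len(line_check)
--         best_num = ''
--         for num_check, num in number_map.items():
--             if i == 0:
--                 ind = line_check.find(num_check)
--             else:
--                 ind = line_check.find(num_check[::-1])
--             if ind != -1:
--                 if ind < best_ind:
--                     best_ind = ind
--                     best_num = num
--         assert best_num != ""
--         num_str += best_num
--     return int(num_str)
-- ===== SOURCE B (Python) =====
-- # Single forward scan: at each position try every token; record the first and last match.
-- _tokens = [
--     ("zero", 0), ("one", 1), ("two", 2), ("three", 3), ("four", 4),
--     ("five", 5), ("six", 6), ("seven", 7), ("eight", 8), ("nine", 9),
--     ("0", 0), ("1", 1), ("2", 2), ("3", 3), ("4", 4),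
--     ("5", 5), ("6", 6), ("7", 7), ("8", 8), ("9", 9),
-- ]
--
-- def get_spelled_number(line):
--     first = None
--     last = None
--     for i in range(len(line)):
--         for tok, d in _tokens:
--             if line.startswith(tok, i):
--                 if first is None:
--                     first = d
--                 last = d
--                 break
--     assert first is not None
--     return first * 10 + last
-- ===== Notes on version B (the rewrite author's own statement) =====
-- stated objective: simpler
-- what changed: A runs str.find for each of the 20 tokens on the line and again on the reversed line (with reversed tokens) and picks the minimum index each time; B makes one forward scan over positions, testing startswith(token, i), keeping the first and the last matched digit, and returns first*10+last. Pre_ excludes lines containing no digit or spelled digit, on which both A and B raise AssertionError.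
import Mathlib
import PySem

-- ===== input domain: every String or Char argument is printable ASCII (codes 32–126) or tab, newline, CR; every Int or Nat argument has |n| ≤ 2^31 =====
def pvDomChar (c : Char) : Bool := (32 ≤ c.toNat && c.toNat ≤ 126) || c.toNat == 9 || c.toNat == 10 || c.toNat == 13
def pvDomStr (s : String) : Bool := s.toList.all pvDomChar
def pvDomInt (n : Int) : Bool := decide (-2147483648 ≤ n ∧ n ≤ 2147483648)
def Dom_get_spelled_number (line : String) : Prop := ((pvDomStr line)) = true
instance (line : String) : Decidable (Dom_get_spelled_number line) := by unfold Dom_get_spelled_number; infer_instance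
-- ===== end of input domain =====

-- B replaces A's 20 per-token str.find passes over the line and its reversal by one forward
-- positional scan keeping the first and last matched digit (return value equivalence; no mutation).

-- ===== PORT A =====
def numberMap : List (String × String) := [
  ("zero","0"),("one","1"),("two","2"),("three","3"),("four","4"),
  ("five","5"),("six","6"),("seven","7"),("eight","8"),("nine","9"),
  ("0","0"),("1","1"),("2","2"),("3","3"),("4","4"),
  ("5","5"),("6","6"),("7","7"),("8","8"),("9","9")]

-- literal transliteration of A; strings are handled as their char lists (PySem.Chars)
def get_spelled_number (line : String) : Int :=
  let cs := line.toList
  let num_str := (PySem.List.enumerate [cs, (PySem.List.slice? cs none none (-1)).getD []]).foldl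
    (fun (num_str : List Char) ic =>
      let best := numberMap.foldl
        (fun (st : Int × String) p =>
          let ind := if ic.1 == 0 then PySem.Chars.find ic.2 p.1.toList
                     else PySem.Chars.find ic.2 ((PySem.List.slice? p.1.toList none none (-1)).getD [])
          if ind ≠ -1 then (if ind < st.1 then (ind, p.2) else st) else st)
        (PySem.List.len ic.2, "")
      num_str ++ best.2.toList)    -- num_str += best_num  (assert best_num != "" holds under Pre_)
    []
  (PySem.Int.ofChars? num_str).getD 0   -- int(num_str); under Pre_ num_str is always two digits

-- ===== PORT B =====
def tokens_alt : List (String × Int) := [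
  ("zero",0),("one",1),("two",2),("three",3),("four",4),
  ("five",5),("six",6),("seven",7),("eight",8),("nine",9),
  ("0",0),("1",1),("2",2),("3",3),("4",4),
  ("5",5),("6",6),("7",7),("8",8),("9",9)]

-- literal transliteration of B: one forward scan; the inner for-with-break is List.find?
def get_spelled_number_alt (line : String) : Int :=
  let cs := line.toList
  let fl := (List.range cs.length).foldl
    (fun (st : Option Int × Option Int) i =>
      match tokens_alt.find? (fun p => PySem.Chars.startswith (cs.drop i) p.1.toList) with
      | some p => (some (st.1.getD p.2), some p.2)   -- first = d if first is None; last = d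
      | none => st)
    (none, none)
  match fl.1, fl.2 with
  | some f, some l => f * 10 + l
  | _, _ => 0    -- unreachable under Pre_ (the assert)

-- ===== PRECONDITION & SPEC =====
def spelledTokens : List String :=
  ["zero","one","two","three","four","five","six","seven","eight","nine",
   "0","1","2","3","4","5","6","7","8","9"]

-- Pre_ excludes lines containing no digit and no spelled digit: there A's `assert` (and B's) raises AssertionError.
def Pre_get_spelled_number (line : String) : Prop :=
  (spelledTokens.any (fun t => PySem.Str.isIn t line)) = true
instance (line : String) : Decidable (Pre_get_spelled_number line) := by
  unfold Pre_get_spelled_number; infer_instance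

def pvWitness_get_spelled_number : String := "x3one"

def Spec_get_spelled_number (line : String) (out : Int) : Prop := out = get_spelled_number_alt line
instance (line : String) (out : Int) : Decidable (Spec_get_spelled_number line out) := by
  unfold Spec_get_spelled_number; infer_instance

-- ===== CLAIM (what is proved, stated in full; the proofs are below) =====
def Claim_equal_get_spelled_number : Prop := ∀ (line : String), Dom_get_spelled_number line → Pre_get_spelled_number line → Spec_get_spelled_number line (get_spelled_number line)

-- ===== LEMMAS AND PROOFS =====

-- ---- facts about the token table (finite checks) ----
lemma tok_ne_nil : ∀ p ∈ tokens_alt, p.1.toList ≠ [] := by decide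

lemma tok_infix_eq : ∀ p ∈ tokens_alt, ∀ q ∈ tokens_alt, p.1.toList <:+: q.1.toList → p = q := by decide

lemma numberMap_eq :
    numberMap = tokens_alt.map (fun q => (q.1, String.ofList (PySem.Int.toChars q.2))) := by decide

lemma digit_concat : ∀ p ∈ tokens_alt, ∀ q ∈ tokens_alt,
    PySem.Int.ofChars? (PySem.Int.toChars p.2 ++ PySem.Int.toChars q.2) = some (p.2 * 10 + q.2) := by
  decide

lemma spelled_sub : ∀ t ∈ spelledTokens, ∃ p ∈ tokens_alt, p.1 = t := by decide

-- at a fixed position at most one token matches (no token is a prefix of another)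
lemma uniq_at (cs : List Char) (i : Nat) (p q : String × Int)
    (hp : p ∈ tokens_alt) (hq : q ∈ tokens_alt)
    (h1 : p.1.toList <+: cs.drop i) (h2 : q.1.toList <+: cs.drop i) : p = q := by
  rcases List.prefix_or_prefix_of_prefix h1 h2 with h | h
  · exact tok_infix_eq p hp q hq h.isInfix
  · exact (tok_infix_eq q hq p hp h.isInfix).symm

-- ---- generic argmin fold (A's inner loop) ----
lemma foldl_argmin {α β : Type} (F : α → Int) (val : α → β) :
    ∀ (ts : List α) (b0 : Int) (v0 : β),
    (ts.foldl (fun st q => if F q ≠ -1 then (if F q < st.1 then (F q, val q) else st) else st) (b0, v0)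
        = (b0, v0) ∧ ∀ p ∈ ts, F p = -1 ∨ b0 ≤ F p)
    ∨ (∃ p ∈ ts, F p ≠ -1 ∧ F p < b0 ∧
        ts.foldl (fun st q => if F q ≠ -1 then (if F q < st.1 then (F q, val q) else st) else st) (b0, v0)
          = (F p, val p) ∧ ∀ q ∈ ts, F q = -1 ∨ F p ≤ F q) := by
  intro ts
  induction ts with
  | nil => intro b0 v0; exact Or.inl ⟨rfl, by simp⟩
  | cons x ts ih =>
    intro b0 v0
    by_cases hx : F x ≠ -1 ∧ F x < b0
    · have hstep : (List.foldl (fun st q => if F q ≠ -1 then (if F q < st.1 then (F q, val q) else st) else st) (b0, v0) (x :: ts))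
          = List.foldl (fun st q => if F q ≠ -1 then (if F q < st.1 then (F q, val q) else st) else st) (F x, val x) ts := by
        simp [List.foldl_cons, hx.1, hx.2]
      rcases ih (F x) (val x) with ⟨heq, hall⟩ | ⟨p, hp, hne, hlt, heq, hmin⟩
      · refine Or.inr ⟨x, List.mem_cons_self .., hx.1, hx.2, by rw [hstep, heq], ?_⟩
        intro q hq
        rcases List.mem_cons.mp hq with rfl | hq
        · exact Or.inr le_rfl
        · rcases hall q hq with h | h
          · exact Or.inl h
          · exact Or.inr h
      · refine Or.inr ⟨p, List.mem_cons_of_mem _ hp, hne, lt_trans hlt hx.2, by rw [hstep, heq], ?_⟩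
        intro q hq
        rcases List.mem_cons.mp hq with rfl | hq
        · exact Or.inr (le_of_lt hlt)
        · exact hmin q hq
    · have hstep : (List.foldl (fun st q => if F q ≠ -1 then (if F q < st.1 then (F q, val q) else st) else st) (b0, v0) (x :: ts))
          = List.foldl (fun st q => if F q ≠ -1 then (if F q < st.1 then (F q, val q) else st) else st) (b0, v0) ts := by
        by_cases h1 : F x = -1
        · simp [List.foldl_cons, h1]
        · have h2 : ¬ F x < b0 := by tauto
          simp [List.foldl_cons, h1, h2]
      have hx' : F x = -1 ∨ b0 ≤ F x := by
        by_cases h1 : F x = -1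
        · exact Or.inl h1
        · exact Or.inr (le_of_not_gt (by tauto))
      rcases ih b0 v0 with ⟨heq, hall⟩ | ⟨p, hp, hne, hlt, heq, hmin⟩
      · refine Or.inl ⟨by rw [hstep, heq], ?_⟩
        intro q hq
        rcases List.mem_cons.mp hq with rfl | hq
        · exact hx'
        · exact hall q hq
      · refine Or.inr ⟨p, List.mem_cons_of_mem _ hp, hne, hlt, by rw [hstep, heq], ?_⟩
        intro q hq
        rcases List.mem_cons.mp hq with rfl | hq
        · rcases hx' with h | h
          · exact Or.inl h
          · exact Or.inr (le_trans (le_of_lt hlt) h)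
        · exact hmin q hq

-- ---- B's fold computes (head?, getLast?) of the list of hits ----
lemma fold_first_last (g : Nat → Option (String × Int)) :
    ∀ (l : List Nat) (st : Option Int × Option Int),
    l.foldl (fun st i => match g i with
                         | some p => (some (st.1.getD p.2), some p.2)
                         | none => st) st
    = ((match (l.filterMap g).head? with
        | some p => some (st.1.getD p.2)
        | none => st.1),
       (match (l.filterMap g).getLast? with
        | some p => some p.2
        | none => st.2)) := by
  intro l
  induction l with
  | nil => intro st; simp
  | cons i l ih =>
    intro st
    cases hgi : g i with
    | none => simp [List.foldl_cons, hgi, ih st]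
    | some p =>
      rw [List.foldl_cons]
      simp only [hgi]
      rw [ih]
      simp only [List.filterMap_cons, hgi]
      refine Prod.ext ?_ ?_
      · cases h : (List.filterMap g l).head? with
        | none => simp
        | some q => cases st.1 <;> simp
      · cases h : (List.filterMap g l).getLast? with
        | none =>
          have : List.filterMap g l = [] := List.getLast?_eq_none_iff.mp h
          simp [this]
        | some q =>
          simp [List.getLast?_cons, h]

-- ---- position lemmas ----
lemma range_filterMap_head (g : Nat → Option (String × Int)) (n j : Nat) (v : String × Int)
    (hj : j < n) (hgj : g j = some v) (hbefore : ∀ k < j, g k = none) :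
    ((List.range n).filterMap g).head? = some v := by
  have h1 : n = j + (n - j) := by omega
  rw [h1, List.range_add, List.filterMap_append]
  have h2 : List.filterMap g (List.range j) = [] := by
    rw [List.filterMap_eq_nil_iff]
    intro k hk
    simp [hbefore k (List.mem_range.mp hk)]
  rw [h2, List.nil_append]
  obtain ⟨m, hm⟩ : ∃ m, n - j = m + 1 := ⟨n - j - 1, by omega⟩
  rw [hm, List.range_succ_eq_map]
  simp [hgj]

lemma range_filterMap_getLast (g : Nat → Option (String × Int)) (n j : Nat) (v : String × Int)
    (hj : j < n) (hgj : g j = some v) (hafter : ∀ k, j < k → k < n → g k = none) :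
    ((List.range n).filterMap g).getLast? = some v := by
  have h1 : n = (j + 1) + (n - j - 1) := by omega
  rw [h1, List.range_add, List.filterMap_append]
  have h2 : List.filterMap g (List.map (fun x => j + 1 + x) (List.range (n - j - 1))) = [] := by
    rw [List.filterMap_eq_nil_iff]
    intro k hk
    obtain ⟨x, hx, rfl⟩ := List.mem_map.mp hk
    have hx' := List.mem_range.mp hx
    have hlt1 : j < j + 1 + x := by omega
    have hlt2 : j + 1 + x < n := by omega
    exact hafter _ hlt1 hlt2
  rw [h2, List.append_nil, List.range_succ, List.filterMap_append]
  simp [hgj]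

lemma prefix_drop_len (cs t : List Char) (j : Nat) (ht : t ≠ []) (h : t <+: cs.drop j) :
    j + t.length ≤ cs.length := by
  have h1 := h.length_le
  simp only [List.length_drop] at h1
  have h2 : 0 < t.length := List.length_pos_iff.mpr ht
  omega

lemma find_le_of_prefix_drop (cs t : List Char) (j : Nat) (h : t <+: cs.drop j) :
    0 ≤ PySem.Chars.find cs t ∧ PySem.Chars.find cs t ≤ (j : Int) := by
  have hinf : t <:+: cs := by
    have h2 : cs.drop j <:+ cs := List.drop_suffix j cs
    exact h.isInfix.trans h2.isInfix
  have h0 : 0 ≤ PySem.Chars.find cs t := (PySem.Chars.find_nonneg_iff cs t).mpr hinf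
  refine ⟨h0, ?_⟩
  by_contra hlt
  have hj : j < (PySem.Chars.find cs t).toNat := by omega
  exact (PySem.Chars.find_spec h0).2 j hj h

lemma prefix_drop_suffix_take (cs t : List Char) (k : Nat) (h : t <+: cs.drop k) :
    t <:+ cs.take (k + t.length) := by
  have h1 : t = (cs.drop k).take t.length := List.prefix_iff_eq_take.mp h
  have h2 : (cs.drop k).take t.length = (cs.take (k + t.length)).drop k := by
    rw [List.drop_take]
    congr 1
    omega
  have h3 : (cs.take (k + t.length)).drop k <:+ cs.take (k + t.length) := List.drop_suffix _ _
  rw [← h2, ← h1] at h3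
  exact h3

lemma infix_of_prefix_drop (l a : List Char) (d m : Nat)
    (h : a <+: l.drop d) (hm : d + a.length ≤ m) : a <:+: l.take m := by
  have h3 : a <:+ l.take (d + a.length) := prefix_drop_suffix_take l a d h
  exact h3.isInfix.trans (List.take_prefix_take_left hm).isInfix

lemma rev_match_iff (cs t : List Char) (e : Nat) (he : e ≤ cs.length) :
    t.reverse <+: cs.reverse.drop (cs.length - e) ↔ t <:+ cs.take e := by
  rw [List.drop_reverse]
  have : cs.length - (cs.length - e) = e := by omega
  rw [this, List.reverse_prefix]

lemma suffix_take_prefix_drop (cs t : List Char) (e : Nat) (he : e ≤ cs.length)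
    (h : t <:+ cs.take e) : t <+: cs.drop (e - t.length) := by
  obtain ⟨u, hu⟩ := h
  have hlen : u.length + t.length = e := by
    have h5 := congrArg List.length hu
    simp [List.length_take, Nat.min_eq_left he] at h5
    omega
  have hcs : cs = u ++ (t ++ cs.drop e) := by
    conv_lhs => rw [← List.take_append_drop e cs, ← hu]
    simp [List.append_assoc]
  rw [hcs]
  have h6 : e - t.length = u.length := by omega
  rw [h6, List.drop_left]
  exact List.prefix_append t _

-- ---- derived helpers ----
lemma found_lt (cs t : List Char) (ht : t ≠ []) (hinf : t <:+: cs) :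
    0 ≤ PySem.Chars.find cs t ∧ PySem.Chars.find cs t < (cs.length : Int) := by
  have h0 := (PySem.Chars.find_nonneg_iff cs t).mpr hinf
  have hpre := (PySem.Chars.find_spec h0).1
  have hlen := prefix_drop_len cs t _ ht hpre
  have hpos : 0 < t.length := List.length_pos_iff.mpr ht
  refine ⟨h0, ?_⟩
  omega

lemma pre_exists (line : String) (h : Pre_get_spelled_number line) :
    ∃ p ∈ tokens_alt, p.1.toList <:+: line.toList := by
  unfold Pre_get_spelled_number at h
  rw [List.any_eq_true] at h
  obtain ⟨t, ht, hin⟩ := h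
  obtain ⟨p, hp, rfl⟩ := spelled_sub t ht
  exact ⟨p, hp, (PySem.Str.isIn_iff_infix _ _).mp hin⟩

theorem main_eq (line : String) (hpre : Pre_get_spelled_number line) :
    get_spelled_number line = get_spelled_number_alt line := by
  obtain ⟨p0, hp0, hp0inf⟩ := pre_exists line hpre
  have hp0ne := tok_ne_nil p0 hp0
  have hp0rev : p0.1.toList.reverse <:+: line.toList.reverse := List.reverse_infix.mpr hp0inf
  -- forward round (A's i = 0)
  rcases foldl_argmin (fun q => PySem.Chars.find line.toList q.1.toList)
      (fun q => String.ofList (PySem.Int.toChars q.2)) tokens_alt (line.toList.length : Int) ""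
    with ⟨_, hall⟩ | ⟨p1, hp1, h1ne, _, hfold1, h1min⟩
  · exfalso
    have hf := found_lt line.toList p0.1.toList hp0ne hp0inf
    have h' : PySem.Chars.find line.toList p0.1.toList = -1 ∨
        (line.toList.length : Int) ≤ PySem.Chars.find line.toList p0.1.toList := hall p0 hp0
    rcases h' with h | h <;> omega
  -- backward round (A's i = 1)
  rcases foldl_argmin (fun q => PySem.Chars.find line.toList.reverse q.1.toList.reverse)
      (fun q => String.ofList (PySem.Int.toChars q.2)) tokens_alt (line.toList.length : Int) ""
    with ⟨_, hall⟩ | ⟨p2, hp2, h2ne, _, hfold2, h2min⟩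
  · exfalso
    have hf := found_lt line.toList.reverse p0.1.toList.reverse (by simp [hp0ne]) hp0rev
    have h' : PySem.Chars.find line.toList.reverse p0.1.toList.reverse = -1 ∨
        (line.toList.length : Int) ≤ PySem.Chars.find line.toList.reverse p0.1.toList.reverse :=
      hall p0 hp0
    simp only [List.length_reverse] at hf
    rcases h' with h | h <;> omega
  simp only at hfold1 hfold2 h1min h2min h1ne h2ne
  -- abbreviations
  set cs := line.toList with hcsdef
  set n := cs.length with hndef
  -- forward position facts
  have h1nn : 0 ≤ PySem.Chars.find cs p1.1.toList := by
    rcases Int.lt_or_lt_of_ne h1ne with h | h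
    · exfalso
      have := PySem.Chars.neg_one_le_find cs p1.1.toList
      omega
    · omega
  set m := (PySem.Chars.find cs p1.1.toList).toNat with hmdef
  have h1pre : p1.1.toList <+: cs.drop m := (PySem.Chars.find_spec h1nn).1
  have hmn : m + p1.1.toList.length ≤ n := prefix_drop_len cs _ m (tok_ne_nil p1 hp1) h1pre
  have hp1pos : 0 < p1.1.toList.length := List.length_pos_iff.mpr (tok_ne_nil p1 hp1)
  have hbefore : ∀ k < m, ∀ q ∈ tokens_alt, ¬ q.1.toList <+: cs.drop k := by
    intro k hk q hq hqpre
    have hle := find_le_of_prefix_drop cs q.1.toList k hqpre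
    rcases h1min q hq with h | h
    · omega
    · omega
  -- backward position facts
  have h2nn : 0 ≤ PySem.Chars.find cs.reverse p2.1.toList.reverse := by
    have := PySem.Chars.neg_one_le_find cs.reverse p2.1.toList.reverse
    rcases Int.lt_or_lt_of_ne h2ne with h | h <;> omega
  set mR := (PySem.Chars.find cs.reverse p2.1.toList.reverse).toNat with hmRdef
  have h2pre : p2.1.toList.reverse <+: cs.reverse.drop mR := (PySem.Chars.find_spec h2nn).1
  have hmRn : mR + p2.1.toList.length ≤ n := by
    have := prefix_drop_len cs.reverse p2.1.toList.reverse mR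
      (by simp [tok_ne_nil p2 hp2]) h2pre
    simpa using this
  have hp2pos : 0 < p2.1.toList.length := List.length_pos_iff.mpr (tok_ne_nil p2 hp2)
  set e := n - mR with hedef
  set S := e - p2.1.toList.length with hSdef
  have hmR_eq : n - e = mR := by omega
  have hSmatch : p2.1.toList <+: cs.drop S := by
    have hsuf : p2.1.toList <:+ cs.take e := by
      rw [← rev_match_iff cs p2.1.toList e (by omega)]
      rw [hmR_eq]
      exact h2pre
    exact suffix_take_prefix_drop cs p2.1.toList e (by omega) hsuf
  have hafter : ∀ k, S < k → k < n → ∀ q ∈ tokens_alt, ¬ q.1.toList <+: cs.drop k := by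
    intro k hSk hk q hq hqpre
    have hqne := tok_ne_nil q hq
    have hqpos : 0 < q.1.toList.length := List.length_pos_iff.mpr hqne
    have heq_le : k + q.1.toList.length ≤ n := prefix_drop_len cs _ k hqne hqpre
    -- q's occurrence ends at k + |q|; A's reverse minimality bounds every end by e
    have hqsuf : q.1.toList <:+ cs.take (k + q.1.toList.length) :=
      prefix_drop_suffix_take cs q.1.toList k hqpre
    have hqrev : q.1.toList.reverse <+: cs.reverse.drop (n - (k + q.1.toList.length)) :=
      (rev_match_iff cs q.1.toList _ heq_le).mpr hqsuf
    have hqfind := find_le_of_prefix_drop cs.reverse q.1.toList.reverse _ hqrev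
    have hqmin : (mR : Int) ≤ PySem.Chars.find cs.reverse q.1.toList.reverse := by
      rcases h2min q hq with h | h
      · omega
      · omega
    have hend : k + q.1.toList.length ≤ e := by omega
    -- then q's occurrence sits inside p2's, so q is an infix of p2
    have hdropk : cs.drop k = (cs.drop S).drop (k - S) := by
      rw [List.drop_drop]
      congr 1
      omega
    have hinfix : q.1.toList <:+: (cs.drop S).take p2.1.toList.length := by
      refine infix_of_prefix_drop (cs.drop S) q.1.toList (k - S) p2.1.toList.length ?_ (by omega)
      rw [← hdropk]; exact hqpre
    have htake : (cs.drop S).take p2.1.toList.length = p2.1.toList :=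
      (List.prefix_iff_eq_take.mp hSmatch).symm
    rw [htake] at hinfix
    have : q = p2 := tok_infix_eq q hq p2 hp2 hinfix
    subst this
    omega
  -- the scan function of B
  have hgsome : ∀ (j : Nat) (p : String × Int), p ∈ tokens_alt → p.1.toList <+: cs.drop j →
      tokens_alt.find? (fun p => PySem.Chars.startswith (cs.drop j) p.1.toList) = some p := by
    intro j p hp hppre
    cases hfq : tokens_alt.find? (fun q => PySem.Chars.startswith (cs.drop j) q.1.toList) with
    | none =>
      exfalso
      have := List.find?_eq_none.mp hfq p hp
      rw [PySem.Chars.startswith_iff] at this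
      exact this hppre
    | some q =>
      have hqmem := List.mem_of_find?_eq_some hfq
      have hq' := List.find?_some
        (p := fun r : String × Int => PySem.Chars.startswith (cs.drop j) r.1.toList) hfq
      simp only [PySem.Chars.startswith_iff] at hq'
      rw [uniq_at cs j q p hqmem hp hq' hppre]
  have hgnone : ∀ (j : Nat), (∀ q ∈ tokens_alt, ¬ q.1.toList <+: cs.drop j) →
      tokens_alt.find? (fun p => PySem.Chars.startswith (cs.drop j) p.1.toList) = none := by
    intro j hj
    rw [List.find?_eq_none]
    intro q hq
    rw [PySem.Chars.startswith_iff]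
    exact hj q hq
  have hhead : ((List.range n).filterMap
      (fun i => tokens_alt.find? (fun p => PySem.Chars.startswith (cs.drop i) p.1.toList))).head?
      = some p1 :=
    range_filterMap_head _ n m p1 (by omega) (hgsome m p1 hp1 h1pre)
      (fun k hk => hgnone k (hbefore k hk))
  have hlast : ((List.range n).filterMap
      (fun i => tokens_alt.find? (fun p => PySem.Chars.startswith (cs.drop i) p.1.toList))).getLast?
      = some p2 :=
    range_filterMap_getLast _ n S p2 (by omega) (hgsome S p2 hp2 hSmatch)
      (fun k h1 h2 => hgnone k (hafter k h1 h2))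
  -- evaluate port B
  have hB : get_spelled_number_alt line = p1.2 * 10 + p2.2 := by
    simp only [get_spelled_number_alt, ← hcsdef, ← hndef]
    rw [fold_first_last
      (fun i => tokens_alt.find? (fun p => PySem.Chars.startswith (cs.drop i) p.1.toList))
      (List.range n) (none, none)]
    rw [hhead, hlast]
    simp
  -- evaluate port A
  rw [hB]
  simp only [get_spelled_number]
  simp only [show ∀ (a b : List Char), PySem.List.enumerate [a,b] = [((0:Int),a),(1,b)]
    from fun _ _ => rfl]
  simp only [PySem.List.slice?_none_none_neg_one, Option.getD_some, List.foldl_cons,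
    List.foldl_nil]
  simp only [PySem.List.len_eq]
  simp only [show ((0:Int) == 0) = true by rfl, show ((1:Int) == 0) = false by rfl]
  simp only [if_true, Bool.false_eq_true, if_false]
  simp only [List.length_reverse]
  rw [numberMap_eq]
  simp only [List.foldl_map, ← hcsdef, ← hndef]
  rw [hfold1, hfold2]
  simp only [List.nil_append, String.toList_ofList]
  rw [digit_concat p1 hp1 p2 hp2]
  simp

-- ===== VERDICT (by name: the statement is the Claim_ definition above) =====
theorem get_spelled_number_spec : Claim_equal_get_spelled_number := by
  intro line _ hpre
  unfold Spec_get_spelled_number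
  exact main_eq line hpre
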